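-- pv_equiv track=rewrite | github.com/key-moon/golf | base_arcdsl/task110.py | val_func_hperiod
-- ===== SOURCE A (Python) =====
-- def val_func_rightmost(patch):
--     return max(j for i, j in val_func_toindices(patch))
--
-- def val_func_toindices(patch):
--     if len(patch) == 0:
--         return frozenset()
--     if isinstance(next(iter(patch))[1], tuple):
--         return frozenset(val_func_index for value, val_func_index in patch)
--     return patch
--
-- def val_func_leftmost(patch):
--     return min(j for i, j in val_func_toindices(patch))
--
-- def val_func_uppermost(patch):
--     return min(i for i, j in val_func_toindices(patch))
--
-- def val_func_normalize(patch):
--     if len(patch) == 0: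
--         return patch
--     return val_func_shift(patch, (-val_func_uppermost(patch), -val_func_leftmost(patch)))
--
-- def val_func_hperiod(obj):
--     val_func_normalized = val_func_normalize(obj)
--     w = val_func_width(val_func_normalized)
--     for p in range(1, w):
--         offsetted = val_func_shift(val_func_normalized, (0, -p))
--         pruned = frozenset({(c, (i, j)) for c, (i, j) in offsetted if j >= 0})
--         if pruned.issubset(val_func_normalized):
--             return p
--     return w
--
-- def val_func_shift(patch, directions):
--     if len(patch) == 0:
--         return patch
--     di, dj = directions
--     if isinstance(next(iter(patch))[1], tuple):
--         return frozenset((value, (i + di, j + dj)) for value, (i, j) in patch)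
--     return frozenset((i + di, j + dj) for i, j in patch)
--
-- def val_func_width(piece):
--     if len(piece) == 0:
--         return 0
--     if isinstance(piece, tuple):
--         return len(piece[0])
--     return val_func_rightmost(piece) - val_func_leftmost(piece) + 1
-- ===== SOURCE B (Python) =====
-- def val_func_hperiod(obj):
--     if not obj:
--         return 0
--     cells = {(c, i, j) for c, (i, j) in obj}
--     lo = min(j for _, _, j in cells)
--     hi = max(j for _, _, j in cells)
--     for c, (i, j) in obj:
--         if j == hi:
--             cm, im = c, i
--             break
--     cands = sorted({hi - j2 for c2, i2, j2 in cells if c2 == cm and i2 == im and j2 < hi})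
--     for p in cands:
--         if all(j - lo < p or (c, i, j - p) in cells for c, i, j in cells):
--             return p
--     return hi - lo + 1
-- ===== Notes on version B (the rewrite author's own statement) =====
-- stated objective: faster
-- what changed: B never scans the range of candidate widths: any horizontal period must align the rightmost column's first cell with another cell of the same value and row, so B checks only the sorted pairwise column distances from that anchor cell (at most n candidates, O(n^2) total and independent of the width), instead of A's normalize-then-shift-prune-issubset test for every p in 1..w-1.
import Mathlib
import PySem

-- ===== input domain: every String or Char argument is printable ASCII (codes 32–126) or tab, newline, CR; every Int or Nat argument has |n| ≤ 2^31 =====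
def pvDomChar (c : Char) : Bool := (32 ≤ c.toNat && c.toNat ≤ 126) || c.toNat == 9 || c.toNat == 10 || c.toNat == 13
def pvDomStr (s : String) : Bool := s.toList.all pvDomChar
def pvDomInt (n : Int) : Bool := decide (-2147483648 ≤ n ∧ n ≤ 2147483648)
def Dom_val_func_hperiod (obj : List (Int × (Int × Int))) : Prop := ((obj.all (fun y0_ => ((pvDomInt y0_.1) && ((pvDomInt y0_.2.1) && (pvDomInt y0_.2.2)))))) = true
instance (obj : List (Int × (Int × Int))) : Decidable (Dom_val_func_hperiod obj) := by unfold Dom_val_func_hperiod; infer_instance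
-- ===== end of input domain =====

-- B scans no range of widths at all: any period must align the rightmost column's anchor cell
-- with another cell of the same value and row, so B checks only the sorted pairwise column
-- distances from that anchor instead of every p in 1..w-1 (measured faster by the timing
-- run); return value identical.

-- ===== PORT A =====
-- A's helpers, specialized to the cell form (value,(i,j)) this signature fixes: the
-- isinstance branch Python takes on such input. Python's max()/min() raise on empty;
-- every call site below guards nonemptiness, so the '.getD 0' default is unreachable.
def val_func_toindices (patch : List (Int × (Int × Int))) : PySem.Set (Int × Int) :=
  if patch.length = 0 then PySem.Set.empty
  else PySem.Set.ofList (patch.map (fun x => x.2))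

def val_func_rightmost (patch : List (Int × (Int × Int))) : Int :=
  (PySem.List.max? ((val_func_toindices patch).map (fun ij => ij.2)) (fun y => y)).getD 0

def val_func_leftmost (patch : List (Int × (Int × Int))) : Int :=
  (PySem.List.min? ((val_func_toindices patch).map (fun ij => ij.2)) (fun y => y)).getD 0

def val_func_uppermost (patch : List (Int × (Int × Int))) : Int :=
  (PySem.List.min? ((val_func_toindices patch).map (fun ij => ij.1)) (fun y => y)).getD 0

def val_func_shift (patch : List (Int × (Int × Int))) (directions : Int × Int) : List (Int × (Int × Int)) :=
  if patch.length = 0 then patch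
  else PySem.Set.ofList (patch.map (fun x => (x.1, (x.2.1 + directions.1, x.2.2 + directions.2))))

def val_func_normalize (patch : List (Int × (Int × Int))) : List (Int × (Int × Int)) :=
  if patch.length = 0 then patch
  else val_func_shift patch (-(val_func_uppermost patch), -(val_func_leftmost patch))

def val_func_width (piece : List (Int × (Int × Int))) : Int :=
  -- Python's 'isinstance(piece, tuple)' grid branch is never taken: piece is a patch here
  if piece.length = 0 then 0
  else val_func_rightmost piece - val_func_leftmost piece + 1

def val_func_hperiod_loop (normalized : List (Int × (Int × Int))) (w : Int) :
    List Int → Int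
  | [] => w
  | p :: ps =>
    let offsetted := val_func_shift normalized (0, -p)
    let pruned := PySem.Set.ofList (offsetted.filter (fun x => decide (0 ≤ x.2.2)))
    if PySem.Set.issubset pruned normalized then p else val_func_hperiod_loop normalized w ps

def val_func_hperiod (obj : List (Int × (Int × Int))) : Int :=
  let normalized := val_func_normalize obj
  let w := val_func_width normalized
  val_func_hperiod_loop normalized w (PySem.List.pyRange 1 w 1)

-- ===== PORT B =====
-- helpers name Source B's intermediate values, one per line of Source B
def hpCells (obj : List (Int × (Int × Int))) : PySem.Set (Int × Int × Int) :=
  PySem.Set.ofList (obj.map (fun x => (x.1, x.2.1, x.2.2)))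

def hpLo (cells : PySem.Set (Int × Int × Int)) : Int :=
  (PySem.List.min? (cells.map (fun t => t.2.2)) (fun y => y)).getD 0

def hpHi (cells : PySem.Set (Int × Int × Int)) : Int :=
  (PySem.List.max? (cells.map (fun t => t.2.2)) (fun y => y)).getD 0

def hpCands (cells : PySem.Set (Int × Int × Int)) (hi : Int) (anchor : Int × (Int × Int)) :
    List Int :=
  PySem.List.sorted (PySem.Set.ofList ((cells.filter
    (fun t => t.1 == anchor.1 && t.2.1 == anchor.2.1 && decide (t.2.2 < hi))).map
    (fun t => hi - t.2.2))) (fun y => y) false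

def hpOk (cells : PySem.Set (Int × Int × Int)) (lo p : Int) : Bool :=
  cells.all (fun t => decide (t.2.2 - lo < p) ||
    PySem.Set.contains cells (t.1, t.2.1, t.2.2 - p))

def val_func_hperiod_alt (obj : List (Int × (Int × Int))) : Int :=
  if obj.length = 0 then 0
  else
    let cells := hpCells obj
    let lo := hpLo cells
    let hi := hpHi cells
    -- the for/break anchor search; the default is unreachable (hi is attained in obj)
    let anchor := (obj.find? (fun x => x.2.2 == hi)).getD (0, (0, 0))
    let cands := hpCands cells hi anchor
    ((cands.find? (fun p => hpOk cells lo p)).getD (hi - lo + 1))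

-- ===== PRECONDITION & SPEC =====
def Spec_val_func_hperiod (obj : List (Int × (Int × Int))) (out : Int) : Prop := out = val_func_hperiod_alt obj
instance (obj : List (Int × (Int × Int))) (out : Int) : Decidable (Spec_val_func_hperiod obj out) := by unfold Spec_val_func_hperiod; infer_instance

-- ===== CLAIM (what is proved, stated in full; the proofs are below) =====
def Claim_equal_val_func_hperiod : Prop := ∀ (obj : List (Int × (Int × Int))), Dom_val_func_hperiod obj → Spec_val_func_hperiod obj (val_func_hperiod obj)

-- ===== LEMMAS AND PROOFS =====

-- extrema with key = id depend only on the members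
theorem pv_min_congr (xs ys : List Int) (h : ∀ a, a ∈ xs ↔ a ∈ ys) :
    PySem.List.min? xs (fun y => y) = PySem.List.min? ys (fun y => y) := by
  cases hx : PySem.List.min? xs (fun y => y) with
  | none =>
    rw [PySem.List.min?_eq_none_iff] at hx
    have hy : ys = [] := List.eq_nil_iff_forall_not_mem.mpr (fun a ha => by
      have := (h a).mpr ha; simp [hx] at this)
    rw [hy]
    symm
    rw [PySem.List.min?_eq_none_iff]
  | some m =>
    cases hy : PySem.List.min? ys (fun y => y) with
    | none =>
      rw [PySem.List.min?_eq_none_iff] at hy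
      have hm := PySem.List.min?_mem hx
      have := (h m).mp hm; simp [hy] at this
    | some m' =>
      have hm := PySem.List.min?_mem hx
      have hm' := PySem.List.min?_mem hy
      have h1 := PySem.List.min?_isMin hx m' ((h m').mpr hm')
      have h2 := PySem.List.min?_isMin hy m ((h m).mp hm)
      simp only [Option.some.injEq]
      omega

theorem pv_max_congr (xs ys : List Int) (h : ∀ a, a ∈ xs ↔ a ∈ ys) :
    PySem.List.max? xs (fun y => y) = PySem.List.max? ys (fun y => y) := by
  cases hx : PySem.List.max? xs (fun y => y) with
  | none =>
    rw [PySem.List.max?_eq_none_iff] at hx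
    have hy : ys = [] := List.eq_nil_iff_forall_not_mem.mpr (fun a ha => by
      have := (h a).mpr ha; simp [hx] at this)
    rw [hy]
    symm
    rw [PySem.List.max?_eq_none_iff]
  | some m =>
    cases hy : PySem.List.max? ys (fun y => y) with
    | none =>
      rw [PySem.List.max?_eq_none_iff] at hy
      have hm := PySem.List.max?_mem hx
      have := (h m).mp hm; simp [hy] at this
    | some m' =>
      have hm := PySem.List.max?_mem hx
      have hm' := PySem.List.max?_mem hy
      have h1 := PySem.List.max?_isMax hx m' ((h m').mpr hm')
      have h2 := PySem.List.max?_isMax hy m ((h m).mp hm)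
      simp only [Option.some.injEq]
      omega

theorem pv_foldl_min_add (t : List Int) (d : Int) : ∀ x : Int,
    (t.map (fun a => a + d)).foldl min (x + d) = t.foldl min x + d := by
  induction t with
  | nil => intro x; simp
  | cons a t ih =>
    intro x
    rw [List.map_cons, List.foldl_cons, List.foldl_cons, min_add_add_right]
    exact ih (min x a)

theorem pv_foldl_max_add (t : List Int) (d : Int) : ∀ x : Int,
    (t.map (fun a => a + d)).foldl max (x + d) = t.foldl max x + d := by
  induction t with
  | nil => intro x; simp
  | cons a t ih =>
    intro x
    rw [List.map_cons, List.foldl_cons, List.foldl_cons, max_add_add_right]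
    exact ih (max x a)

theorem pv_min_map_add (xs : List Int) (d : Int) :
    PySem.List.min? (xs.map (fun a => a + d)) (fun y => y)
      = (PySem.List.min? xs (fun y => y)).map (fun a => a + d) := by
  cases xs with
  | nil =>
    have h0 : PySem.List.min? ([] : List Int) (fun y => y) = none := by
      rw [PySem.List.min?_eq_none_iff]
    simp [h0]
  | cons x t =>
    simp only [List.map_cons, PySem.List.min?_id_cons, Option.map_some, Option.some.injEq]
    exact pv_foldl_min_add t d x

theorem pv_max_map_add (xs : List Int) (d : Int) :
    PySem.List.max? (xs.map (fun a => a + d)) (fun y => y)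
      = (PySem.List.max? xs (fun y => y)).map (fun a => a + d) := by
  cases xs with
  | nil =>
    have h0 : PySem.List.max? ([] : List Int) (fun y => y) = none := by
      rw [PySem.List.max?_eq_none_iff]
    simp [h0]
  | cons x t =>
    simp only [List.map_cons, PySem.List.max?_id_cons, Option.map_some, Option.some.injEq]
    exact pv_foldl_max_add t d x

-- membership in a shifted nonempty patch
theorem pv_mem_shift (patch : List (Int × (Int × Int))) (hne : patch ≠ []) (di dj : Int)
    (x : Int × (Int × Int)) :
    x ∈ val_func_shift patch (di, dj) ↔
      ∃ y ∈ patch, x = (y.1, (y.2.1 + di, y.2.2 + dj)) := by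
  have hlen : ¬ patch.length = 0 := by simpa [List.length_eq_zero_iff] using hne
  simp only [val_func_shift, if_neg hlen, PySem.Set.mem_ofList, List.mem_map]
  constructor
  · rintro ⟨y, hy, rfl⟩; exact ⟨y, hy, rfl⟩
  · rintro ⟨y, hy, rfl⟩; exact ⟨y, hy, rfl⟩

-- on a strictly increasing list, find? returns the least element satisfying the predicate
theorem pv_find?_min (q : Int → Bool) (l : List Int) (hl : l.Pairwise (· < ·))
    (a : Int) (ha : l.find? q = some a) : ∀ b ∈ l, q b = true → a ≤ b := by
  induction l with
  | nil => simp at ha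
  | cons x t ih =>
    intro b hb hqb
    cases hx : q x with
    | true =>
      rw [List.find?_cons_of_pos hx, Option.some.injEq] at ha
      subst ha
      rcases List.mem_cons.mp hb with rfl | hb
      · exact le_refl b
      · exact le_of_lt ((List.pairwise_cons.mp hl).1 b hb)
    | false =>
      rw [List.find?_cons_of_neg (by simp [hx])] at ha
      rcases List.mem_cons.mp hb with rfl | hb
      · rw [hx] at hqb; exact absurd hqb (by decide)
      · exact ih (List.pairwise_cons.mp hl).2 ha b hb hqb

-- two strictly increasing lists containing the same q-satisfying elements give the same
-- first hit (or the same default)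
theorem pv_find?_getD_eq (q : Int → Bool) (l1 l2 : List Int) (w : Int)
    (h1 : l1.Pairwise (· < ·)) (h2 : l2.Pairwise (· < ·))
    (hsub : ∀ p, q p = true → (p ∈ l1 ↔ p ∈ l2)) :
    (l1.find? q).getD w = (l2.find? q).getD w := by
  cases ha : l1.find? q with
  | none =>
    cases hb : l2.find? q with
    | none => rfl
    | some b =>
      have hqb := List.find?_some hb
      have hmem := (hsub b hqb).mpr (List.mem_of_find?_eq_some hb)
      have := List.find?_eq_none.mp ha b hmem
      exact absurd hqb this
  | some a =>
    have hqa := List.find?_some ha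
    have hamem := (hsub a hqa).mp (List.mem_of_find?_eq_some ha)
    cases hb : l2.find? q with
    | none => exact absurd hqa (List.find?_eq_none.mp hb a hamem)
    | some b =>
      have hqb := List.find?_some hb
      have hbmem := (hsub b hqb).mpr (List.mem_of_find?_eq_some hb)
      have hab := pv_find?_min q l2 h2 b hb a hamem hqa
      have hba := pv_find?_min q l1 h1 a ha b hbmem hqb
      simp only [Option.getD_some]
      omega

-- find? depends only on the predicate's values on the list
theorem pv_find?_congr (p q : Int → Bool) (l : List Int) (h : ∀ x ∈ l, p x = q x) :
    l.find? p = l.find? q := by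
  induction l with
  | nil => rfl
  | cons a l ih =>
    have ha := h a List.mem_cons_self
    cases hq : q a with
    | true => rw [List.find?_cons_of_pos (ha ▸ hq), List.find?_cons_of_pos hq]
    | false =>
      rw [List.find?_cons_of_neg (by simp [ha, hq]), List.find?_cons_of_neg (by simp [hq])]
      exact ih (fun x hx => h x (List.mem_cons_of_mem _ hx))

-- ===== VERDICT (by name: the statement is the Claim_ definition above) =====
theorem val_func_hperiod_spec : Claim_equal_val_func_hperiod := by
  intro obj _hdom
  unfold Spec_val_func_hperiod
  by_cases hobj : obj = []
  · subst hobj; rfl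
  have hlen : ¬ obj.length = 0 := by simpa [List.length_eq_zero_iff] using hobj
  obtain ⟨lov, hmin⟩ : ∃ m, PySem.List.min? (obj.map (fun y => y.2.2)) (fun y => y) = some m := by
    cases h : PySem.List.min? (obj.map (fun y => y.2.2)) (fun y => y) with
    | none => rw [PySem.List.min?_eq_none_iff, List.map_eq_nil_iff] at h; exact absurd h hobj
    | some m => exact ⟨m, rfl⟩
  obtain ⟨hiv, hmax⟩ : ∃ m, PySem.List.max? (obj.map (fun y => y.2.2)) (fun y => y) = some m := by
    cases h : PySem.List.max? (obj.map (fun y => y.2.2)) (fun y => y) with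
    | none => rw [PySem.List.max?_eq_none_iff, List.map_eq_nil_iff] at h; exact absurd h hobj
    | some m => exact ⟨m, rfl⟩
  obtain ⟨uiv, hminI⟩ : ∃ m, PySem.List.min? (obj.map (fun y => y.2.1)) (fun y => y) = some m := by
    cases h : PySem.List.min? (obj.map (fun y => y.2.1)) (fun y => y) with
    | none => rw [PySem.List.min?_eq_none_iff, List.map_eq_nil_iff] at h; exact absurd h hobj
    | some m => exact ⟨m, rfl⟩
  have hto : val_func_toindices obj = PySem.Set.ofList (obj.map (fun x => x.2)) := by
    rw [val_func_toindices, if_neg hlen]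
  have hleft : val_func_leftmost obj = lov := by
    rw [val_func_leftmost, hto,
        pv_min_congr _ (obj.map (fun y => y.2.2)) (fun a => by
          simp only [List.mem_map, PySem.Set.mem_ofList]; aesop),
        hmin]
    rfl
  have hup : val_func_uppermost obj = uiv := by
    rw [val_func_uppermost, hto,
        pv_min_congr _ (obj.map (fun y => y.2.1)) (fun a => by
          simp only [List.mem_map, PySem.Set.mem_ofList]; aesop),
        hminI]
    rfl
  have hnorm : val_func_normalize obj = val_func_shift obj (-uiv, -lov) := by
    rw [val_func_normalize, if_neg hlen, hup, hleft]
  set N := val_func_shift obj (-uiv, -lov) with hN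
  have hmemN : ∀ x, x ∈ N ↔ ∃ y ∈ obj, x = (y.1, (y.2.1 + -uiv, y.2.2 + -lov)) :=
    fun x => pv_mem_shift obj hobj _ _ x
  have hNne : N ≠ [] := by
    obtain ⟨y, hy⟩ := List.exists_mem_of_ne_nil obj hobj
    exact List.ne_nil_of_mem ((hmemN _).mpr ⟨y, hy, rfl⟩)
  have hNlen : ¬ N.length = 0 := by simpa [List.length_eq_zero_iff] using hNne
  have htoN : val_func_toindices N = PySem.Set.ofList (N.map (fun x => x.2)) := by
    rw [val_func_toindices, if_neg hNlen]
  have hrightN : val_func_rightmost N = hiv + -lov := by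
    rw [val_func_rightmost, htoN,
        pv_max_congr _ ((obj.map (fun y => y.2.2)).map (fun a => a + -lov)) (fun a => by
          simp only [List.mem_map, PySem.Set.mem_ofList, hmemN]; aesop),
        pv_max_map_add, hmax]
    rfl
  have hleftN : val_func_leftmost N = lov + -lov := by
    rw [val_func_leftmost, htoN,
        pv_min_congr _ ((obj.map (fun y => y.2.2)).map (fun a => a + -lov)) (fun a => by
          simp only [List.mem_map, PySem.Set.mem_ofList, hmemN]; aesop),
        pv_min_map_add, hmin]
    rfl
  have hwidthN : val_func_width N = hiv - lov + 1 := by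
    rw [val_func_width, if_neg hNlen, hrightN, hleftN]; ring
  -- B's pieces
  set cells := hpCells obj with hcells
  have hmemcells : ∀ a b c : Int, ((a, b, c) ∈ cells ↔ (a, (b, c)) ∈ obj) := by
    intro a b c
    rw [hcells, hpCells, PySem.Set.mem_ofList, List.mem_map]
    constructor
    · rintro ⟨y, hy, he⟩
      obtain ⟨y1, y2, y3⟩ := y
      simp only [Prod.mk.injEq] at he
      obtain ⟨rfl, rfl, rfl⟩ := he
      exact hy
    · intro h; exact ⟨(a, (b, c)), h, rfl⟩
  have hlo : hpLo cells = lov := by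
    rw [hpLo, pv_min_congr _ (obj.map (fun y => y.2.2)) (fun a => by
          simp only [List.mem_map, hcells, hpCells, PySem.Set.mem_ofList]; aesop),
        hmin]
    rfl
  have hhi : hpHi cells = hiv := by
    rw [hpHi, pv_max_congr _ (obj.map (fun y => y.2.2)) (fun a => by
          simp only [List.mem_map, hcells, hpCells, PySem.Set.mem_ofList]; aesop),
        hmax]
    rfl
  -- the common characterization of both loop conditions
  have hApred : ∀ p : Int,
      (PySem.Set.issubset (PySem.Set.ofList ((val_func_shift N (0, -p)).filter
          (fun x => decide (0 ≤ x.2.2)))) N = true) ↔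
        (∀ y ∈ obj, lov + p ≤ y.2.2 →
          ∃ z ∈ obj, z.1 = y.1 ∧ z.2.1 = y.2.1 ∧ z.2.2 = y.2.2 - p) := by
    intro p
    rw [PySem.Set.issubset_iff]
    have hmemOff : ∀ x, x ∈ val_func_shift N (0, -p) ↔
        ∃ y ∈ obj, x = (y.1, (y.2.1 + -uiv + 0, y.2.2 + -lov + -p)) := by
      intro x
      rw [pv_mem_shift N hNne]
      constructor
      · rintro ⟨m, hm, rfl⟩
        obtain ⟨y, hy, rfl⟩ := (hmemN m).mp hm
        exact ⟨y, hy, rfl⟩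
      · rintro ⟨y, hy, rfl⟩
        exact ⟨_, (hmemN _).mpr ⟨y, hy, rfl⟩, rfl⟩
    constructor
    · intro h y hy hle
      have hxmem : (y.1, (y.2.1 + -uiv + 0, y.2.2 + -lov + -p)) ∈
          PySem.Set.ofList ((val_func_shift N (0, -p)).filter (fun x => decide (0 ≤ x.2.2))) := by
        rw [PySem.Set.mem_ofList, List.mem_filter]
        exact ⟨(hmemOff _).mpr ⟨y, hy, rfl⟩, by simp only [decide_eq_true_eq]; omega⟩
      obtain ⟨z, hz, hzeq⟩ := (hmemN _).mp (h _ hxmem)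
      simp only [Prod.ext_iff] at hzeq
      exact ⟨z, hz, hzeq.1.symm, by omega, by omega⟩
    · intro hP x hx
      rw [PySem.Set.mem_ofList, List.mem_filter] at hx
      obtain ⟨hx1, hx2⟩ := hx
      obtain ⟨y, hy, rfl⟩ := (hmemOff x).mp hx1
      simp only [decide_eq_true_eq] at hx2
      obtain ⟨z, hz, hz1, hz2, hz3⟩ := hP y hy (by omega)
      refine (hmemN _).mpr ⟨z, hz, ?_⟩
      simp only [Prod.ext_iff]
      exact ⟨hz1.symm, by omega, by omega⟩
  have hcontains : ∀ (y : Int × (Int × Int)) (p : Int),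
      (PySem.Set.contains cells (y.1, y.2.1, y.2.2 - p) = true ↔
        ∃ z ∈ obj, z.1 = y.1 ∧ z.2.1 = y.2.1 ∧ z.2.2 = y.2.2 - p) := by
    intro y p
    rw [PySem.Set.contains_iff, hmemcells]
    constructor
    · intro h; exact ⟨(y.1, (y.2.1, y.2.2 - p)), h, rfl, rfl, rfl⟩
    · rintro ⟨z, hz, h1, h2, h3⟩
      have : (y.1, (y.2.1, y.2.2 - p)) = z := by
        rw [← h1, ← h2, ← h3]
      rw [this]; exact hz
  have hlov_le : ∀ t ∈ cells, lov ≤ t.2.2 := by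
    rintro ⟨a, b, c⟩ ht
    have : c ∈ obj.map (fun y => y.2.2) :=
      List.mem_map.mpr ⟨(a, (b, c)), (hmemcells a b c).mp ht, rfl⟩
    exact PySem.List.min?_isMin hmin c this
  have hBpred : ∀ p : Int,
      (hpOk cells lov p = true ↔
        (∀ y ∈ obj, lov + p ≤ y.2.2 →
          ∃ z ∈ obj, z.1 = y.1 ∧ z.2.1 = y.2.1 ∧ z.2.2 = y.2.2 - p)) := by
    intro p
    rw [hpOk, List.all_eq_true]
    constructor
    · intro h y hy hle
      have ht : ((y.1, y.2.1, y.2.2) : Int × Int × Int) ∈ cells :=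
        (hmemcells y.1 y.2.1 y.2.2).mpr hy
      have := h _ ht
      simp only [Bool.or_eq_true, decide_eq_true_eq] at this
      rcases this with hlt | hc
      · omega
      · exact (hcontains y p).mp hc
    · rintro hP ⟨a, b, c⟩ ht
      simp only [Bool.or_eq_true, decide_eq_true_eq]
      by_cases hlt : c - lov < p
      · exact Or.inl hlt
      · exact Or.inr ((hcontains (a, (b, c)) p).mpr
          (hP (a, (b, c)) ((hmemcells a b c).mp ht) (by show lov + p ≤ c; omega)))
  -- the anchor cell: first element of obj in the rightmost column
  obtain ⟨x0, hfind⟩ : ∃ x0, obj.find? (fun x => x.2.2 == hiv) = some x0 := by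
    have : hiv ∈ obj.map (fun y => y.2.2) := PySem.List.max?_mem hmax
    obtain ⟨y, hy, hyv⟩ := List.mem_map.mp this
    exact Option.isSome_iff_exists.mp (List.find?_isSome.mpr ⟨y, hy, by simp [hyv]⟩)
  have hx0mem : x0 ∈ obj := List.mem_of_find?_eq_some hfind
  have hx0val : x0.2.2 = hiv := by
    have := List.find?_some hfind
    simpa using this
  set cands := hpCands cells hiv x0 with hcands
  have hmemcands : ∀ p : Int, (p ∈ cands ↔
      ∃ t ∈ cells, (t.1 = x0.1 ∧ t.2.1 = x0.2.1 ∧ t.2.2 < hiv) ∧ hiv - t.2.2 = p) := by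
    intro p
    rw [hcands, hpCands, PySem.List.mem_sorted, PySem.Set.mem_ofList, List.mem_map]
    constructor
    · rintro ⟨t, ht, rfl⟩
      rw [List.mem_filter] at ht
      obtain ⟨ht1, ht2⟩ := ht
      simp only [Bool.and_eq_true, beq_iff_eq, decide_eq_true_eq] at ht2
      exact ⟨t, ht1, ⟨ht2.1.1, ht2.1.2, ht2.2⟩, rfl⟩
    · rintro ⟨t, ht, ⟨h1, h2, h3⟩, rfl⟩
      exact ⟨t, List.mem_filter.mpr ⟨ht, by simp [h1, h2, h3]⟩, rfl⟩
  -- both searches scan strictly increasing lists holding the same good periods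
  have hsub : ∀ p : Int,
      hpOk cells lov p = true →
        (p ∈ PySem.List.pyRange 1 (hiv - lov + 1) 1 ↔ p ∈ cands) := by
    intro p hq
    have hcond := (hBpred p).mp hq
    constructor
    · intro hpr
      have hpb := PySem.List.mem_pyRange_one.mp hpr
      obtain ⟨z, hz, hz1, hz2, hz3⟩ := hcond x0 hx0mem (by omega)
      refine (hmemcands p).mpr ⟨(z.1, z.2.1, z.2.2), (hmemcells z.1 z.2.1 z.2.2).mpr hz,
        ⟨hz1, hz2, show z.2.2 < hiv by omega⟩, show hiv - z.2.2 = p by omega⟩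
    · intro hpc
      obtain ⟨t, ht, ⟨h1, h2, h3⟩, h4⟩ := (hmemcands p).mp hpc
      have := hlov_le t ht
      exact PySem.List.mem_pyRange_one.mpr ⟨by omega, by omega⟩
  have hloop : ∀ (ps : List Int) (w : Int),
      val_func_hperiod_loop N w ps =
        (ps.find? (fun p => PySem.Set.issubset (PySem.Set.ofList
          ((val_func_shift N (0, -p)).filter (fun x => decide (0 ≤ x.2.2)))) N)).getD w := by
    intro ps w
    induction ps with
    | nil => rfl
    | cons p ps ih =>
      simp only [val_func_hperiod_loop, List.find?_cons]
      cases h : PySem.Set.issubset (PySem.Set.ofList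
          ((val_func_shift N (0, -p)).filter (fun x => decide (0 ≤ x.2.2)))) N with
      | true => simp
      | false =>
        rw [if_neg Bool.false_ne_true]
        simpa using ih
  have hpred : ∀ p ∈ PySem.List.pyRange 1 (hiv - lov + 1) 1,
      (PySem.Set.issubset (PySem.Set.ofList
          ((val_func_shift N (0, -p)).filter (fun x => decide (0 ≤ x.2.2)))) N)
        = hpOk cells lov p := by
    intro p _
    rw [Bool.eq_iff_iff, hApred p, hBpred p]
  rw [show val_func_hperiod obj =
        val_func_hperiod_loop (val_func_normalize obj) (val_func_width (val_func_normalize obj))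
          (PySem.List.pyRange 1 (val_func_width (val_func_normalize obj)) 1) from rfl,
      hnorm, hwidthN, hloop, pv_find?_congr _ _ _ hpred]
  rw [show val_func_hperiod_alt obj =
        (if obj.length = 0 then (0 : Int) else
          (((hpCands (hpCells obj) (hpHi (hpCells obj))
              ((obj.find? (fun x => x.2.2 == hpHi (hpCells obj))).getD (0, (0, 0)))).find?
            (fun p => hpOk (hpCells obj) (hpLo (hpCells obj)) p)).getD
            (hpHi (hpCells obj) - hpLo (hpCells obj) + 1))) from rfl]
  rw [if_neg hlen, ← hcells, hlo, hhi, hfind]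
  rw [show ((some x0).getD ((0 : Int), ((0 : Int), (0 : Int)))) = x0 from rfl, ← hcands]
  exact pv_find?_getD_eq _ _ _ _ (PySem.List.pairwise_lt_pyRange_one 1 (hiv - lov + 1))
    (PySem.List.sorted_ofList_pairwise_lt _) hsub
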